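-- pv_equiv track=rewrite | github.com/xshill/adventofcode16 | day4.py | is_most_common
-- ===== SOURCE A (Python) =====
-- def is_most_common(test_letter, frequency):
--     if test_letter not in frequency:
--         return False
--
--     test_frequency = frequency[test_letter]
--
--     for letter, count in frequency.items():
--         if test_letter != letter:
--             if count > test_frequency:
--                 return False
--             elif count == test_frequency and ord(letter) < ord(test_letter):
--                 return False
--
--     return True
-- ===== SOURCE B (Python) =====
-- def is_most_common(test_letter, frequency):
--     if test_letter not in frequency:
--         return False
--     ranked = sorted(frequency, key=lambda l: (-frequency[l], l))
--     return ranked[0] == test_letter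
-- ===== Notes on version B (the rewrite author's own statement) =====
-- stated objective: alternative
-- what changed: B builds a full ranking of the letters with sorted(frequency, key=lambda l: (-frequency[l], l)) and tests whether the top-ranked letter is test_letter, replacing A's early-exit scan that compares test_letter's count against every other entry.
-- outside the precondition, e.g. on is_most_common('a', {'bb': 2, 'a': 1, 'cc': 1}): A returns False, B returns False
import Mathlib
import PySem

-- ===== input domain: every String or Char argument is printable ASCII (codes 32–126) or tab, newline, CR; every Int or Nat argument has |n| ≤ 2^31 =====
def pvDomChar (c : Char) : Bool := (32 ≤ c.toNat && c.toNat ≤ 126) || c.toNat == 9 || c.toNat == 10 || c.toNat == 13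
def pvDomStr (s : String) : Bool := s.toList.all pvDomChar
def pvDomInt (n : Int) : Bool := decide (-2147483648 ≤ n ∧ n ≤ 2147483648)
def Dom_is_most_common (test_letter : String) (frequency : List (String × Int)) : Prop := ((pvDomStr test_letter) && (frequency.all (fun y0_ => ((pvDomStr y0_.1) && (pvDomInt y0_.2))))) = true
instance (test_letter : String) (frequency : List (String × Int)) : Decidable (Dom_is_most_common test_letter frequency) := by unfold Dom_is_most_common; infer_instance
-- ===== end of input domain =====

-- B ranks all letters once with sorted(frequency, key=lambda l: (-frequency[l], l)) and tests
-- whether the top-ranked letter is test_letter, instead of A's early-exit per-entry scan.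

-- first-match lookup in the association list representing the Python dict
def pyLookup (k : String) : List (String × Int) → Option Int
  | [] => none
  | (l, c) :: rest => if l = k then some c else pyLookup k rest

-- Python's ord(s); exact for single-character strings (Pre_ excludes every input on
-- which A's Python evaluates ord on a string of another length, where ord raises)
def pyOrd (s : String) : Int :=
  match s.toList with
  | [c] => (c.toNat : Int)
  | _ => 0

-- ===== PORT A =====
-- the for-loop of A: first violating entry returns False, else True
def aLoop (test_letter : String) (test_frequency : Int) : List (String × Int) → Bool
  | [] => true
  | (letter, count) :: rest =>
    if test_letter ≠ letter then
      if count > test_frequency then false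
      else if count = test_frequency ∧ pyOrd letter < pyOrd test_letter then false
      else aLoop test_letter test_frequency rest
    else aLoop test_letter test_frequency rest

def is_most_common (test_letter : String) (frequency : List (String × Int)) : Bool :=
  -- 'test_letter not in frequency' and 'frequency[test_letter]' become one lookup match
  match pyLookup test_letter frequency with
  | none => false
  | some test_frequency => aLoop test_letter test_frequency frequency

-- ===== PORT B =====
-- the sort key (-frequency[l], l): Python compares such tuples lexicographically, with the
-- string compared by code points — exactly the lexicographic order on Lex (Int × List Char)
def bKey (frequency : List (String × Int)) (l : String) : Lex (Int × List Char) :=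
  toLex (-((pyLookup l frequency).getD 0), l.toList)  -- keys come from frequency: the lookup always succeeds

def is_most_common_alt (test_letter : String) (frequency : List (String × Int)) : Bool :=
  if frequency.any (fun p => p.1 == test_letter) then
    -- ranked = sorted(frequency, key=…); ranked[0] cannot raise: the membership guard makes it nonempty
    match PySem.List.sorted (frequency.map Prod.fst) (bKey frequency) with
    | [] => false
    | top :: _ => decide (top = test_letter)
  else false

-- ===== PRECONDITION & SPEC =====
-- Pre_ (i) requires distinct keys — the list stands for a Python dict, whose keys are unique,
-- so duplicate-key lists are representation artefacts — and (ii) excludes inputs where some other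
-- entry ties test_letter's count while that entry's key or test_letter is not a single character:
-- there A's ord() raises TypeError (or would have, had an earlier entry not already returned False).
def Pre_is_most_common (test_letter : String) (frequency : List (String × Int)) : Prop :=
  (frequency.map Prod.fst).Nodup ∧
  ∀ p ∈ frequency, ∀ q ∈ frequency, q.1 = test_letter → p.1 ≠ test_letter → p.2 = q.2 →
    (p.1.toList.length = 1 ∧ test_letter.toList.length = 1)
instance (test_letter : String) (frequency : List (String × Int)) : Decidable (Pre_is_most_common test_letter frequency) := by unfold Pre_is_most_common; infer_instance

def pvWitness_is_most_common : String × (List (String × Int)) := ("a", [("a", 2), ("b", 1)])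

def Spec_is_most_common (test_letter : String) (frequency : List (String × Int)) (out : Bool) : Prop := out = is_most_common_alt test_letter frequency
instance (test_letter : String) (frequency : List (String × Int)) (out : Bool) : Decidable (Spec_is_most_common test_letter frequency out) := by unfold Spec_is_most_common; infer_instance

-- ===== CLAIM (what is proved, stated in full; the proofs are below) =====
def Claim_equal_is_most_common : Prop := ∀ (test_letter : String) (frequency : List (String × Int)), Dom_is_most_common test_letter frequency → Pre_is_most_common test_letter frequency → Spec_is_most_common test_letter frequency (is_most_common test_letter frequency)

-- ===== LEMMAS AND PROOFS =====

-- the pointwise condition A's loop checks of one entry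
def passP (test_letter : String) (tf : Int) (p : String × Int) : Prop :=
  p.1 = test_letter ∨ p.2 < tf ∨ (p.2 = tf ∧ ¬ pyOrd p.1 < pyOrd test_letter)

theorem lexLt_iff (a b : Int) (x y : List Char) :
    toLex (a, x) < toLex (b, y) ↔ a < b ∨ (a = b ∧ x < y) := Prod.Lex.lt_iff

theorem pyLookup_eq_none (k : String) (fs : List (String × Int))
    (h : pyLookup k fs = none) : ∀ p ∈ fs, p.1 ≠ k := by
  induction fs with
  | nil => intro p hp; cases hp
  | cons q rest ih =>
    obtain ⟨l, c⟩ := q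
    by_cases hl : l = k
    · simp [pyLookup, hl] at h
    · intro p hp
      rcases List.mem_cons.1 hp with hp | hp
      · subst hp; exact hl
      · exact ih (by simpa [pyLookup, hl] using h) p hp

theorem pyLookup_mem (k : String) (v : Int) (fs : List (String × Int))
    (h : pyLookup k fs = some v) : (k, v) ∈ fs := by
  induction fs with
  | nil => cases h
  | cons q rest ih =>
    obtain ⟨l, c⟩ := q
    by_cases hl : l = k
    · have hc : c = v := by simpa [pyLookup, hl] using h
      subst hl; subst hc; exact List.mem_cons_self
    · exact List.mem_cons_of_mem _ (ih (by simpa [pyLookup, hl] using h))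

theorem pyLookup_of_mem_nodup (l : String) (c : Int) (fs : List (String × Int))
    (hnd : (fs.map Prod.fst).Nodup) (hm : (l, c) ∈ fs) : pyLookup l fs = some c := by
  induction fs with
  | nil => cases hm
  | cons q rest ih =>
    obtain ⟨l', c'⟩ := q
    have hnd' := List.nodup_cons.1 (show (l' :: rest.map Prod.fst).Nodup from hnd)
    rcases List.mem_cons.1 hm with hm | hm
    · obtain ⟨h1, h2⟩ := Prod.mk.injEq .. ▸ hm.symm
      simp [pyLookup, h1, h2]
    · have hl : l' ≠ l := by
        intro he
        exact hnd'.1 (he ▸ List.mem_map.2 ⟨(l, c), hm, rfl⟩)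
      simpa [pyLookup, hl] using ih hnd'.2 hm

theorem aLoop_true_iff (test : String) (tf : Int) (fs : List (String × Int)) :
    aLoop test tf fs = true ↔ ∀ p ∈ fs, passP test tf p := by
  induction fs with
  | nil => simp [aLoop]
  | cons q rest ih =>
    obtain ⟨l, c⟩ := q
    by_cases hl : test = l
    · simp only [aLoop, if_neg (not_not_intro hl), ih]
      constructor
      · intro h p hp
        rcases List.mem_cons.1 hp with hp | hp
        · exact Or.inl (by simp [hp, hl])
        · exact h p hp
      · intro h p hp; exact h p (List.mem_cons_of_mem _ hp)
    · by_cases hc : c > tf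
      · simp only [aLoop, if_pos (show test ≠ l from hl), if_pos hc]
        constructor
        · intro h; cases h
        · intro h
          rcases h (l, c) List.mem_cons_self with h1 | h1 | h1
          · exact absurd h1.symm hl
          · omega
          · omega
      · by_cases ho : c = tf ∧ pyOrd l < pyOrd test
        · simp only [aLoop, if_pos (show test ≠ l from hl), if_neg hc, if_pos ho]
          constructor
          · intro h; cases h
          · intro h
            rcases h (l, c) List.mem_cons_self with h1 | h1 | h1
            · exact absurd h1.symm hl
            · omega
            · exact absurd ho.2 h1.2
        · simp only [aLoop, if_pos (show test ≠ l from hl), if_neg hc, if_neg ho, ih]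
          constructor
          · intro h p hp
            rcases List.mem_cons.1 hp with hp | hp
            · right
              rw [hp]
              rcases lt_or_eq_of_le (not_lt.1 hc) with h1 | h1
              · exact Or.inl h1
              · exact Or.inr ⟨h1, fun hlt => ho ⟨h1, hlt⟩⟩
            · exact h p hp
          · intro h p hp; exact h p (List.mem_cons_of_mem _ hp)

-- single-character strings: pyOrd comparisons transfer to the code-point list order
theorem singleton_lt_iff (c d : Char) : ([c] < [d]) ↔ c < d := by
  constructor
  · intro h
    cases h with
    | rel h => exact h
    | cons h => cases h
  · exact List.Lex.rel

theorem pyOrd_lt_of_single (s t : String) (c d : Char)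
    (hs : s.toList = [c]) (ht : t.toList = [d]) :
    pyOrd s < pyOrd t ↔ c < d := by
  simp only [pyOrd, hs, ht]
  constructor
  · intro h; exact Char.lt_def.2 (by exact_mod_cast h)
  · intro h; exact_mod_cast Char.lt_def.1 h

theorem single_eq_of_pyOrd_eq (s t : String) (c d : Char)
    (hs : s.toList = [c]) (ht : t.toList = [d]) (h : pyOrd s = pyOrd t) : s = t := by
  have h2 : c.toNat = d.toNat := by
    simp only [pyOrd, hs, ht] at h
    exact_mod_cast h
  exact String.toList_inj.mp (by rw [hs, ht, Char.ext (UInt32.toNat_inj.mp h2)])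

-- ===== VERDICT (by name: the statement is the Claim_ definition above) =====
theorem is_most_common_spec : Claim_equal_is_most_common := by
  intro test fs _hDom hPre
  obtain ⟨hnd, htie⟩ := hPre
  unfold Spec_is_most_common is_most_common is_most_common_alt
  cases hlk : pyLookup test fs with
  | none =>
    have hno : ∀ p ∈ fs, p.1 ≠ test := pyLookup_eq_none test fs hlk
    have hany : fs.any (fun p => p.1 == test) = false := by
      simp only [List.any_eq_false]
      intro p hp
      simpa using hno p hp
    simp [hany]
  | some tf =>
    have hmem : (test, tf) ∈ fs := pyLookup_mem test tf fs hlk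
    have hany : fs.any (fun p => p.1 == test) = true :=
      List.any_eq_true.2 ⟨(test, tf), hmem, by simp⟩
    rw [if_pos hany]
    -- key of a pair in fs is determined by its own count (keys are distinct)
    have hkey : ∀ q ∈ fs, bKey fs q.1 = toLex (-q.2, q.1.toList) := by
      intro q hq
      simp [bKey, pyLookup_of_mem_nodup q.1 q.2 fs hnd hq]
    have hktest : bKey fs test = toLex (-tf, test.toList) := hkey (test, tf) hmem
    have htestm : test ∈ fs.map Prod.fst := List.mem_map.2 ⟨(test, tf), hmem, rfl⟩
    obtain ⟨top, tl, hsort⟩ : ∃ top tl,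
        PySem.List.sorted (fs.map Prod.fst) (bKey fs) = top :: tl := by
      cases hs : PySem.List.sorted (fs.map Prod.fst) (bKey fs) with
      | nil =>
        have := (PySem.List.sorted_eq_nil_iff (fs.map Prod.fst) (bKey fs) false).1 hs
        rw [this] at htestm; cases htestm
      | cons a b => exact ⟨a, b, rfl⟩
    rw [hsort]
    have htopmem : top ∈ fs.map Prod.fst := by
      have := (PySem.List.mem_sorted (fs.map Prod.fst) (bKey fs) false top).1
      rw [hsort] at this
      exact this List.mem_cons_self
    have htople : ∀ y ∈ fs.map Prod.fst, bKey fs top ≤ bKey fs y :=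
      PySem.List.key_head_sorted_le (fs.map Prod.fst) (bKey fs) hsort
    by_cases hall : ∀ q ∈ fs, passP test tf q
    · -- A returns True; show the top of the ranking is test
      have hA : aLoop test tf fs = true := (aLoop_true_iff test tf fs).2 hall
      -- test's key is strictly below every other key
      have hstrict : ∀ q ∈ fs, q.1 ≠ test → bKey fs test < bKey fs q.1 := by
        intro q hq hne
        rw [hkey q hq, hktest, lexLt_iff]
        rcases hall q hq with h1 | h1 | h1
        · exact absurd h1 hne
        · exact Or.inl (by omega)
        · obtain ⟨hc1, hc2⟩ := htie q hq (test, tf) hmem rfl hne h1.1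
          obtain ⟨cq, hcq⟩ := List.length_eq_one_iff.1 hc1
          obtain ⟨ct, hct⟩ := List.length_eq_one_iff.1 hc2
          have hne' : pyOrd q.1 ≠ pyOrd test := fun he =>
            hne (single_eq_of_pyOrd_eq q.1 test cq ct hcq hct he)
          have hlt : pyOrd test < pyOrd q.1 := by
            rcases lt_or_eq_of_le (not_lt.1 h1.2) with h | h
            · exact h
            · exact absurd h.symm hne'
          refine Or.inr ⟨by omega, ?_⟩
          rw [hct, hcq, singleton_lt_iff]
          exact (pyOrd_lt_of_single test q.1 ct cq hct hcq).1 hlt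
      have htop : top = test := by
        by_contra hne
        obtain ⟨q, hq, rfl⟩ := List.mem_map.1 htopmem
        exact absurd (htople test htestm) (not_le.2 (hstrict q hq hne))
      simp [hA, htop]
    · -- A returns False; show the top of the ranking is not test
      have hA : aLoop test tf fs = false := by
        cases h : aLoop test tf fs
        · rfl
        · exact absurd ((aLoop_true_iff test tf fs).1 h) hall
      push Not at hall
      obtain ⟨q, hq, hviol⟩ := hall
      unfold passP at hviol
      push Not at hviol
      obtain ⟨hqne, hqge, hqtie⟩ := hviol
      have hqlt : bKey fs q.1 < bKey fs test := by
        rw [hkey q hq, hktest, lexLt_iff]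
        rcases lt_or_eq_of_le hqge with h | h
        · exact Or.inl (by omega)
        · have hlt := hqtie h.symm
          obtain ⟨hc1, hc2⟩ := htie q hq (test, tf) hmem rfl hqne h.symm
          obtain ⟨cq, hcq⟩ := List.length_eq_one_iff.1 hc1
          obtain ⟨ct, hct⟩ := List.length_eq_one_iff.1 hc2
          refine Or.inr ⟨by omega, ?_⟩
          rw [hct, hcq, singleton_lt_iff]
          exact (pyOrd_lt_of_single q.1 test cq ct hcq hct).1 hlt
      have htopne : top ≠ test := by
        intro he
        have := htople q.1 (List.mem_map.2 ⟨q, hq, rfl⟩)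
        rw [he] at this
        exact absurd this (not_le.2 hqlt)
      simp [hA, htopne]
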